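-- pv_equiv track=rewrite | github.com/rafaaga/Judges | Python/UVA-12834.py | solve
-- ===== SOURCE A (Python) =====
-- def solve(X, Y, k):
--     proffit = []
--     for i in range(len(X)):
--         proffit.append(Y[i]-X[i])
--     proffit.sort()
--     for i in range(k):
--         if proffit[i] < 0:
--             proffit[i] = 0
--     return sum(proffit)
-- ===== SOURCE B (Python) =====
-- def solve(X, Y, k):
--     total = 0
--     negs = []
--     for x, y in zip(X, Y):
--         p = y - x
--         total += p
--         if p < 0:
--             negs.append(p)
--     negs.sort()
--     if k > 0:
--         total -= sum(negs[:k])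
--     return total
-- ===== Notes on version B (the rewrite author's own statement) =====
-- stated objective: alternative
-- what changed: B makes one pass over zip(X,Y) accumulating the total and collecting only the negative profits, then sorts just those negatives and subtracts the sum of the k smallest, instead of building the full profit list, sorting it all and clamping its first k entries in place before summing.
import Mathlib
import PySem

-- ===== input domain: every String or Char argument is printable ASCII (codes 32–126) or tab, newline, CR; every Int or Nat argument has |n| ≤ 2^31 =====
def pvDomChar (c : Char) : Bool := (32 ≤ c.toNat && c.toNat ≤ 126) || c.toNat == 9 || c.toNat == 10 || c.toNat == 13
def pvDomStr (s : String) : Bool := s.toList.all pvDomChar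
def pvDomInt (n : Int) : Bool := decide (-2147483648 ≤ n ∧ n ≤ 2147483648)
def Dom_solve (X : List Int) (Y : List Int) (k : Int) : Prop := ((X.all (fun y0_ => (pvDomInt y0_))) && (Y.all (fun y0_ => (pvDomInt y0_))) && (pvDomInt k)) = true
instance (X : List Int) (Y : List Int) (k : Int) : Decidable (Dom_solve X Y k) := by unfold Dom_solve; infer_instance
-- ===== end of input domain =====

-- B sums profits in one pass, collecting and sorting only the negative profits and
-- subtracting the k smallest of them, instead of sorting the full profit list and
-- clamping its first k entries in place (objective: alternative).

-- ===== PORT A =====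
def solve (X : List Int) (Y : List Int) (k : Int) : Int :=
  -- proffit = []; for i in range(len(X)): proffit.append(Y[i]-X[i])
  let proffit : List Int :=
    (PySem.List.pyRange 0 (X.length : Int) 1).foldl
      (fun acc i => acc ++ [PySem.List.pyGetD Y i 0 - PySem.List.pyGetD X i 0]) []
  -- proffit.sort()
  let proffit := PySem.List.sorted proffit (fun v => v) false
  -- for i in range(k): if proffit[i] < 0: proffit[i] = 0
  let proffit :=
    (PySem.List.pyRange 0 k 1).foldl
      (fun l i => if PySem.List.pyGetD l i 0 < 0 then PySem.List.pySetD l i 0 else l) proffit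
  -- return sum(proffit)
  proffit.sum

-- ===== PORT B =====
def solve_alt (X : List Int) (Y : List Int) (k : Int) : Int :=
  -- one pass over zip(X, Y): total of all profits, list of the negative ones
  let tn : Int × List Int :=
    (X.zip Y).foldl
      (fun (acc : Int × List Int) xy =>
        (acc.1 + (xy.2 - xy.1), if xy.2 - xy.1 < 0 then acc.2 ++ [xy.2 - xy.1] else acc.2))
      (0, [])
  -- negs.sort()
  let negs := PySem.List.sorted tn.2 (fun v => v) false
  -- if k > 0: total -= sum(negs[:k])
  if 0 < k then tn.1 - (PySem.List.slice negs none (some k)).sum else tn.1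

-- ===== PRECONDITION & SPEC =====
-- Pre_ excludes exactly the inputs where A raises IndexError: Y shorter than X
-- (Y[i] out of range) or k > len(X) (proffit[i] out of range in the clamp loop).
def Pre_solve (X : List Int) (Y : List Int) (k : Int) : Prop :=
  X.length ≤ Y.length ∧ k ≤ (X.length : Int)
instance (X : List Int) (Y : List Int) (k : Int) : Decidable (Pre_solve X Y k) := by
  unfold Pre_solve; infer_instance

def pvWitness_solve : List Int × List Int × Int := ([1, 5, 3], [4, 2, 9], 2)

def Spec_solve (X : List Int) (Y : List Int) (k : Int) (out : Int) : Prop := out = solve_alt X Y k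
instance (X : List Int) (Y : List Int) (k : Int) (out : Int) : Decidable (Spec_solve X Y k out) := by unfold Spec_solve; infer_instance

-- ===== CLAIM (what is proved, stated in full; the proofs are below) =====
def Claim_equal_solve : Prop := ∀ (X : List Int) (Y : List Int) (k : Int), Dom_solve X Y k → Pre_solve X Y k → Spec_solve X Y k (solve X Y k)

-- ===== LEMMAS AND PROOFS =====

-- the common profit list
def pvP (X Y : List Int) : List Int := (X.zip Y).map (fun xy => xy.2 - xy.1)

-- clamp-at-negative map used to describe A's in-place loop
def pvG (v : Int) : Int := if v < 0 then 0 else v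

lemma pvA_first_loop (X Y : List Int) (h : X.length ≤ Y.length) :
    (PySem.List.pyRange 0 (X.length : Int) 1).foldl
      (fun acc i => acc ++ [PySem.List.pyGetD Y i 0 - PySem.List.pyGetD X i 0]) []
    = pvP X Y := by
  rw [PySem.List.foldl_append_singleton_eq_map]
  apply List.ext_getElem
  · simp [pvP, PySem.List.length_pyRange_one, Nat.min_eq_left h]
  · intro i h1 h2
    have hi : i < X.length := by
      simpa [PySem.List.length_pyRange_one] using h1
    have hiY : i < Y.length := lt_of_lt_of_le hi h
    simp only [List.nil_append, List.getElem_map]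
    rw [PySem.List.getElem_pyRange_one]
    rw [show ((0 : Int) + (i : Int)) = ((i : Nat) : Int) by push_cast; ring]
    rw [PySem.List.pyGetD_natCast, PySem.List.pyGetD_natCast]
    simp [pvP, List.getElem_zip, List.getD_eq_getElem?_getD, hi, hiY]

lemma pvB_loop (l : List (Int × Int)) (t : Int) (ns : List Int) :
    l.foldl
      (fun (acc : Int × List Int) xy =>
        (acc.1 + (xy.2 - xy.1), if xy.2 - xy.1 < 0 then acc.2 ++ [xy.2 - xy.1] else acc.2))
      (t, ns)
    = (t + (l.map (fun xy => xy.2 - xy.1)).sum,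
       ns ++ (l.map (fun xy => xy.2 - xy.1)).filter (fun v => v < 0)) := by
  induction l generalizing t ns with
  | nil => simp
  | cons a l ih =>
    simp only [List.foldl_cons, List.map_cons, List.sum_cons, List.filter_cons, ih]
    by_cases h : a.2 - a.1 < 0 <;> simp [h] <;> ring

-- A's clamp loop turns the first j entries of l into max(·,0) (j ≤ len l)
lemma pvA_clamp_loop (l : List Int) (j : Nat) (hj : j ≤ l.length) :
    (PySem.List.pyRange 0 (j : Int) 1).foldl
      (fun l i => if PySem.List.pyGetD l i 0 < 0 then PySem.List.pySetD l i 0 else l) l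
    = (l.take j).map pvG ++ l.drop j := by
  induction j with
  | zero => simp [PySem.List.pyRange_zero_nat]
  | succ j ih =>
    have hj' : j ≤ l.length := Nat.le_of_succ_le hj
    have hjl : j < l.length := hj
    have hcast : ((j + 1 : Nat) : Int) = (j : Int) + 1 := by push_cast; ring
    rw [hcast, PySem.List.pyRange_one_succ_right (by positivity), List.foldl_append, ih hj']
    have hlen : ((l.take j).map pvG).length = j := by
      simp [Nat.min_eq_left hj']
    have hdrop : l.drop j = l[j] :: l.drop (j + 1) := List.drop_eq_getElem_cons hjl
    have hget : PySem.List.pyGetD ((l.take j).map pvG ++ l.drop j) (j : Int) 0 = l[j] := by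
      rw [PySem.List.pyGetD_natCast, hdrop]
      simp [List.getD_eq_getElem?_getD, List.getElem?_append_right, Nat.min_eq_left hj',
        List.getElem?_eq_getElem hjl]
    have htake : l.take (j + 1) = l.take j ++ [l[j]] := by
      rw [List.take_succ]; simp [List.getElem?_eq_getElem hjl]
    simp only [List.foldl_cons, List.foldl_nil, hget]
    by_cases hneg : l[j] < 0
    · rw [if_pos hneg, PySem.List.pySetD_natCast, List.set_append, hlen,
        if_neg (by omega), Nat.sub_self, htake, List.map_append, hdrop]
      simp only [pvG, List.map_cons, List.map_nil, List.append_assoc, List.cons_append,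
        List.nil_append, if_pos hneg, List.set_cons_zero]
    · rw [if_neg hneg, htake, hdrop, List.map_append]
      simp only [pvG, List.map_cons, List.map_nil, List.append_assoc, List.cons_append,
        List.nil_append, if_neg hneg]

lemma pvSum_map_g (t : List Int) :
    (t.map pvG).sum = t.sum - (t.filter (fun v => v < 0)).sum := by
  induction t with
  | nil => simp
  | cons a t ih =>
    by_cases h : a < 0 <;> simp [pvG, h, List.filter_cons, ih] <;> try ring

-- on a sorted list, filtering the negatives commutes with take
lemma pvFilter_take (S : List Int) (hs : S.Pairwise (fun a b => a ≤ b)) (j : Nat) :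
    (S.take j).filter (fun v => v < 0) = (S.filter (fun v => v < 0)).take j := by
  induction S generalizing j with
  | nil => simp
  | cons a S ih =>
    cases j with
    | zero => simp
    | succ j =>
      have hs' := (List.pairwise_cons.mp hs).2
      have hall := (List.pairwise_cons.mp hs).1
      by_cases h : a < 0
      · simp [List.filter_cons, h, ih hs']
      · have h1 : ∀ x ∈ S, ¬ (x < 0) := fun x hx => by
          have := hall x hx; omega
        have h2 : S.filter (fun v => v < 0) = [] :=
          List.filter_eq_nil_iff.mpr (by intro x hx; simpa using h1 x hx)
        have h3 : (S.take j).filter (fun v => v < 0) = [] :=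
          List.filter_eq_nil_iff.mpr (by intro x hx; simpa using h1 x (List.mem_of_mem_take hx))
        simp [List.filter_cons, h, h2, h3]

-- sorting commutes with filtering the negatives
lemma pvSorted_filter (P : List Int) :
    PySem.List.sorted (P.filter (fun v => v < 0)) (fun v => v) false
    = (PySem.List.sorted P (fun v => v) false).filter (fun v => v < 0) := by
  apply PySem.List.sorted_id_eq_of_perm_of_pairwise
  · exact (PySem.List.sorted_perm P (fun v => v) false).filter _
  · exact List.Pairwise.filter _ (PySem.List.sorted_pairwise P (fun v => v))

-- ===== VERDICT (by name: the statement is the Claim_ definition above) =====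
theorem solve_spec : Claim_equal_solve := by
  intro X Y k _ hpre
  obtain ⟨hlen, hk⟩ := hpre
  unfold Spec_solve solve solve_alt
  rw [pvA_first_loop X Y hlen, pvB_loop]
  set P := pvP X Y with hP
  have hPlen : P.length = X.length := by
    simp [hP, pvP, Nat.min_eq_left hlen]
  set S := PySem.List.sorted P (fun v => v) false with hS
  have hSperm : S.Perm P := PySem.List.sorted_perm P (fun v => v) false
  have hSsum : S.sum = P.sum := hSperm.sum_eq
  have hSlen : S.length = X.length := by rw [hSperm.length_eq, hPlen]
  have hPmap : (X.zip Y).map (fun xy => xy.2 - xy.1) = P := rfl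
  rw [hPmap]
  simp only [List.nil_append, Int.zero_add]
  by_cases hk0 : 0 < k
  · have hkn : k.toNat ≤ S.length := by omega
    have hkc : ((k.toNat : Nat) : Int) = k := by omega
    rw [if_pos hk0, ← hkc, pvA_clamp_loop S k.toNat hkn]
    rw [List.sum_append, pvSum_map_g,
        pvFilter_take S (PySem.List.sorted_pairwise P (fun v => v)) k.toNat,
        ← pvSorted_filter P, PySem.List.slice_to _ (by positivity)]
    simp only [Int.toNat_natCast]
    have := List.sum_take_add_sum_drop S k.toNat
    omega
  · have : PySem.List.pyRange 0 k 1 = [] := PySem.List.pyRange_one_eq_nil (by omega)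
    rw [this, if_neg hk0]
    simpa using hSsum
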